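-- pv_equiv track=rewrite | github.com/ApolloAuto/apollo | docs/doxygen_helpers.py | doxylink_encode
-- ===== SOURCE A (Python) =====
-- def doxylink_encode(path):
--     """doxylink_encode
--     """
--     rules = (
--         ('.md', ''),
--         ('_', '\\_\\_'),
--         ('.', '_8'),
--         ('/', '_2'),
--         ('+', '_09'),
--         (' ', '_01'),
--     )
--     result = path
--     for rule in rules:
--         result = result.replace(*rule)
--
--     return result
-- ===== SOURCE B (Python) =====
-- def doxylink_encode(path):
--     table = {'_': '\\_\\_', '.': '_8', '/': '_2', '+': '_09', ' ': '_01'}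
--     pieces = []
--     for c in path.replace('.md', ''):
--         pieces.append(table.get(c, c))
--     return ''.join(pieces)
-- ===== Notes on version B (the rewrite author's own statement) =====
-- stated objective: idiomatic
-- what changed: Replaced the six sequential whole-string replace passes by one substring-deletion pass followed by a single left-to-right character pass over a lookup table, so each character is transformed exactly once.
import Mathlib
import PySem

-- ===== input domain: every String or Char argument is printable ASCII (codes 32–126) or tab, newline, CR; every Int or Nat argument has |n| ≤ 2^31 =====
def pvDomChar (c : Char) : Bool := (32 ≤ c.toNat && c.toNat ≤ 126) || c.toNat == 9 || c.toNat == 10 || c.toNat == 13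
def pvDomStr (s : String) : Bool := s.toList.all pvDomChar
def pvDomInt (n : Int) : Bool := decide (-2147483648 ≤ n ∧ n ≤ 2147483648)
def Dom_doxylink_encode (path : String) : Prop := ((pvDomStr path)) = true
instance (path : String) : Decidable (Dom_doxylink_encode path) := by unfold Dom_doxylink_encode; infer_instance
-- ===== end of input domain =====

-- B replaces the six sequential whole-string replace passes by one '.md' deletion plus a
-- single table-driven character pass (idiomatic; same asymptotic cost).

-- ===== PORT A =====
def doxylink_encode (path : String) : String :=
  let rules : List (String × String) :=
    [(".md", ""), ("_", "\\_\\_"), (".", "_8"), ("/", "_2"), ("+", "_09"), (" ", "_01")]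
  rules.foldl (fun result rule => PySem.Str.replace result rule.1 rule.2) path

-- ===== PORT B =====
def doxylink_encode_alt (path : String) : String :=
  let table : PySem.Dict Char String :=
    ⟨[('_', "\\_\\_"), ('.', "_8"), ('/', "_2"), ('+', "_09"), (' ', "_01")]⟩
  let s := PySem.Str.replace path ".md" ""
  let pieces := s.toList.foldl (fun acc c => acc ++ [table.getD c (String.ofList [c])]) ([] : List String)
  PySem.Str.join "" pieces

-- ===== PRECONDITION & SPEC =====
def Spec_doxylink_encode (path : String) (out : String) : Prop := out = doxylink_encode_alt path
instance (path : String) (out : String) : Decidable (Spec_doxylink_encode path out) := by unfold Spec_doxylink_encode; infer_instance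

-- ===== CLAIM (what is proved, stated in full; the proofs are below) =====
def Claim_equal_doxylink_encode : Prop := ∀ (path : String), Dom_doxylink_encode path → Spec_doxylink_encode path (doxylink_encode path)

-- ===== LEMMAS AND PROOFS =====

-- the char-wise substitution performed by a single-character replace
def pvSub (c : Char) (new : List Char) (x : Char) : List Char :=
  if x = c then new else [x]

theorem pv_go_single (c : Char) (new : List Char) :
    ∀ (fuel : Nat) (l acc : List Char), l.length ≤ fuel →
      PySem.Chars.replace.go [c] new fuel l acc
        = acc.reverse ++ l.flatMap (pvSub c new) := by
  intro fuel
  induction fuel with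
  | zero =>
    intro l acc h
    have : l = [] := List.eq_nil_of_length_eq_zero (Nat.le_zero.mp h)
    subst this
    simp [PySem.Chars.replace.go]
  | succ n ih =>
    intro l acc h
    cases l with
    | nil => simp [PySem.Chars.replace.go]
    | cons x t =>
      by_cases hx : x = c
      · subst hx
        have hpre : List.isPrefixOf [x] (x :: t) = true := by
          simp [List.isPrefixOf]
        rw [PySem.Chars.replace.go, if_pos hpre]
        have hd : List.drop [x].length (x :: t) = t := rfl
        rw [hd]
        simp only [List.length_cons] at h
        rw [ih _ _ (Nat.le_of_succ_le_succ h)]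
        simp [pvSub]
      · have hpre : List.isPrefixOf [x] (x :: t) = true := by
          simp [List.isPrefixOf]
        have hpre' : List.isPrefixOf [c] (x :: t) = false := by
          simp [List.isPrefixOf]
          exact fun hh => (hx hh.symm).elim
        rw [PySem.Chars.replace.go, if_neg (by simp [hpre'])]
        simp only [List.length_cons] at h
        rw [ih _ _ (Nat.le_of_succ_le_succ h)]
        simp [pvSub, hx]

theorem pv_replace_single (c : Char) (new l : List Char) :
    PySem.Chars.replace l [c] new = l.flatMap (pvSub c new) := by
  rw [PySem.Chars.replace]
  simp only [List.isEmpty_cons]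
  simpa using pv_go_single c new l.length l [] le_rfl

theorem pv_foldl_map {α β : Type} (f : α → β) :
    ∀ (l : List α) (acc : List β),
      l.foldl (fun acc c => acc ++ [f c]) acc = acc ++ l.map f := by
  intro l
  induction l with
  | nil => simp
  | cons x t ih => intro acc; simp [List.foldl, ih]

theorem pv_join_nil_sep : ∀ (parts : List (List Char)),
    PySem.Chars.join [] parts = parts.flatten := by
  intro parts
  induction parts with
  | nil => simp [PySem.Chars.join, List.intercalate]
  | cons p t ih =>
    cases t with
    | nil => simp [PySem.Chars.join, List.intercalate]
    | cons q r =>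
      simp [PySem.Chars.join, List.intercalate] at ih ⊢
      simpa using ih

-- B's per-character table lookup, as a list of characters
def pvTab (c : Char) : List Char :=
  ((PySem.Dict.mk [('_', "\\_\\_"), ('.', "_8"), ('/', "_2"), ('+', "_09"), (' ', "_01")]).getD c
    (String.ofList [c])).toList

-- the composition of A's five single-character passes acts on each character like B's table
theorem pv_charwise (c : Char) :
    List.flatMap
      (fun x2 => List.flatMap
        (fun x3 => List.flatMap
          (fun x4 => List.flatMap (pvSub ' ' ['_', '0', '1']) (pvSub '+' ['_', '0', '9'] x4))
          (pvSub '/' ['_', '2'] x3))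
        (pvSub '.' ['_', '8'] x2))
      (pvSub '_' ['\\', '_', '\\', '_'] c) = pvTab c := by
  by_cases h1 : c = '_'
  · subst h1; decide
  by_cases h2 : c = '.'
  · subst h2; decide
  by_cases h3 : c = '/'
  · subst h3; decide
  by_cases h4 : c = '+'
  · subst h4; decide
  by_cases h5 : c = ' '
  · subst h5; decide
  have b1 : ('_' == c) = false := by simpa [beq_eq_false_iff_ne] using Ne.symm h1
  have b2 : ('.' == c) = false := by simpa [beq_eq_false_iff_ne] using Ne.symm h2
  have b3 : ('/' == c) = false := by simpa [beq_eq_false_iff_ne] using Ne.symm h3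
  have b4 : ('+' == c) = false := by simpa [beq_eq_false_iff_ne] using Ne.symm h4
  have b5 : ((' ' : Char) == c) = false := by simpa [beq_eq_false_iff_ne] using Ne.symm h5
  simp [pvSub, pvTab, PySem.Dict.getD, PySem.Dict.get?, List.find?,
    h1, h2, h3, h4, h5, b1, b2, b3, b4, b5]

-- ===== VERDICT (by name: the statement is the Claim_ definition above) =====
theorem doxylink_encode_spec : Claim_equal_doxylink_encode := by
  intro path _
  unfold Spec_doxylink_encode
  rw [← String.toList_inj]
  simp only [doxylink_encode, doxylink_encode_alt, List.foldl]
  rw [pv_foldl_map]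
  simp only [List.nil_append, PySem.Str.toList_join, PySem.Str.toList_replace]
  have e1 : "_".toList = ['_'] := rfl
  have e2 : ".".toList = ['.'] := rfl
  have e3 : "/".toList = ['/'] := rfl
  have e4 : "+".toList = ['+'] := rfl
  have e5 : " ".toList = [' '] := rfl
  have e0 : "".toList = ([] : List Char) := rfl
  rw [e0, e1, e2, e3, e4, e5]
  rw [pv_replace_single, pv_replace_single, pv_replace_single, pv_replace_single,
    pv_replace_single, pv_join_nil_sep]
  rw [List.flatMap_assoc, List.flatMap_assoc, List.flatMap_assoc, List.flatMap_assoc]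
  rw [List.map_map, List.flatten_eq_flatMap, List.flatMap_map]
  exact List.flatMap_congr (fun c _ => by simpa [Function.comp, pvTab] using pv_charwise c)
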